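-- pv_equiv track=rewrite | github.com/phillipod/SISTER | src/engines/ssim.py | dynamic_hamming_cutoff
-- ===== SOURCE A (Python) =====
-- def dynamic_hamming_cutoff(scores, best_score, max_next_ranks=2, max_allowed_gap=4):
--     from collections import Counter
--     freqs = Counter(scores)
--     sorted_scores = sorted(freqs.items())
--
--     threshold = best_score
--     previous = best_score
--
--     rank_count = 0
--     for score, count in sorted_scores:
--         if score == best_score:
--             continue
--
--         # if this next tier is a massive jump from the best, break
--         if score - previous > max_allowed_gap:
--             break
--
--         threshold = score
--         previous = score
--         rank_count += 1
--
--         if rank_count >= max_next_ranks: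
--             break
--
--     return threshold
-- ===== SOURCE B (Python) =====
-- def dynamic_hamming_cutoff(scores, best_score, max_next_ranks=2, max_allowed_gap=4):
--     # Selection instead of sorting: repeatedly pick the smallest distinct
--     # non-best score above the last taken tier; no Counter, no sort.
--     prev, bound, rank = best_score, None, 0
--     while True:
--         nxt = None
--         for s in scores:
--             if s != best_score and (bound is None or s > bound) and (nxt is None or s < nxt):
--                 nxt = s
--         if nxt is None or nxt - prev > max_allowed_gap:
--             return prev
--         if rank + 1 >= max_next_ranks:
--             return nxt
--         prev, bound, rank = nxt, nxt, rank + 1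
-- ===== Notes on version B (the rewrite author's own statement) =====
-- stated objective: alternative
-- what changed: B eliminates the Counter and the sort entirely: it repeatedly selects by a linear scan the smallest distinct non-best score above the previously taken tier (selection instead of sort-then-walk); O(n*k) where k is the number of tiers actually taken (typically max_next_ranks, so linear for the small default cap, but up to the number of distinct scores in the worst case, where B is slower than A).
import Mathlib
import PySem

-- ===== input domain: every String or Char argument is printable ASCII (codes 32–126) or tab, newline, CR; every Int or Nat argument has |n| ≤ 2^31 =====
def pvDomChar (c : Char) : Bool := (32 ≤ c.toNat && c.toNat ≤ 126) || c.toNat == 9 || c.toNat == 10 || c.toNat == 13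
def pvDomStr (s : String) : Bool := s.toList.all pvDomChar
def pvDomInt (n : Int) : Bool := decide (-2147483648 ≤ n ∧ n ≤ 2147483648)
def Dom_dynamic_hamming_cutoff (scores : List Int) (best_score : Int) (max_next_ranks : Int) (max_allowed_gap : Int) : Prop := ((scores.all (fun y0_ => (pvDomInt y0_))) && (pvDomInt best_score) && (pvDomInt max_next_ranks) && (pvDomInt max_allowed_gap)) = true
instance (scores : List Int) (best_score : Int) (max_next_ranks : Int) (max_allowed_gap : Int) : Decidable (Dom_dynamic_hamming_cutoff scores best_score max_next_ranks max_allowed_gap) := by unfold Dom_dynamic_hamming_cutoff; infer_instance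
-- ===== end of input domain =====

-- B replaces A's Counter + sort + stateful walk by repeated linear selection of
-- the smallest distinct non-best score above the last taken tier (no sorting).

-- ===== PORT A =====
-- A's for-loop over sorted_scores, with its `continue` and the two `break`s.
def pvALoop (best_score max_next_ranks max_allowed_gap : Int) :
    List (Int × Int) → Int → Int → Int → Int
  | [], threshold, _previous, _rank_count => threshold
  | (score, _count) :: rest, threshold, previous, rank_count =>
    if score = best_score then
      pvALoop best_score max_next_ranks max_allowed_gap rest threshold previous rank_count
    else if score - previous > max_allowed_gap then threshold
    else if rank_count + 1 ≥ max_next_ranks then score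
    else pvALoop best_score max_next_ranks max_allowed_gap rest score score (rank_count + 1)

def dynamic_hamming_cutoff (scores : List Int) (best_score : Int) (max_next_ranks : Int) (max_allowed_gap : Int) : Int :=
  let freqs := PySem.Dict.counter scores
  let sorted_scores := PySem.List.sorted2 freqs.items (fun p => p.1) (fun p => p.2)
  pvALoop best_score max_next_ranks max_allowed_gap sorted_scores best_score best_score 0

-- ===== PORT B =====
-- `bound is None or s > bound` and `nxt is None or s < nxt` from B's inner loop.
def pvBoundOk : Option Int → Int → Bool
  | none, _ => true
  | some b, s => decide (b < s)

def pvNxtOk : Option Int → Int → Bool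
  | none, _ => true
  | some m, s => decide (s < m)

-- one step of B's inner `for s in scores` selection loop
def pvSelStep (best : Int) (bound : Option Int) (nxt : Option Int) (s : Int) : Option Int :=
  if (decide (s ≠ best) && pvBoundOk bound s && pvNxtOk nxt s) = true then some s else nxt

-- B's inner loop: smallest score ≠ best above `bound` (none if there is none)
def pvMinAbove (scores : List Int) (best : Int) (bound : Option Int) : Option Int :=
  scores.foldl (pvSelStep best bound) none

-- (termination facts for pvWalk; the port cites them in decreasing_by)
theorem pvFold_some_mem (best : Int) (bound : Option Int) (m : Int) :
    ∀ (l : List Int) (acc : Option Int), l.foldl (pvSelStep best bound) acc = some m →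
      (m ∈ l ∧ (decide (m ≠ best) && pvBoundOk bound m) = true) ∨ acc = some m := by
  intro l
  induction l with
  | nil => intro acc h; exact Or.inr h
  | cons s t ih =>
    intro acc h
    simp only [List.foldl_cons] at h
    rcases ih _ h with ⟨hm, he⟩ | hacc
    · exact Or.inl ⟨by simp [hm], he⟩
    · unfold pvSelStep at hacc
      by_cases hc : (decide (s ≠ best) && pvBoundOk bound s && pvNxtOk acc s) = true
      · rw [if_pos hc] at hacc
        injection hacc with hsm
        subst hsm
        exact Or.inl ⟨by simp, by
          rcases Bool.and_eq_true_iff.mp hc with ⟨h1, _⟩; exact h1⟩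
      · rw [if_neg hc] at hacc
        exact Or.inr hacc

theorem pvFilter_len_le (p p' : Int → Bool) (himp : ∀ s, p' s = true → p s = true) :
    ∀ l : List Int, (l.filter p').length ≤ (l.filter p).length := by
  intro l
  induction l with
  | nil => simp
  | cons a t ih =>
    simp only [List.filter_cons]
    by_cases h' : p' a = true
    · rw [if_pos h', if_pos (himp a h')]
      simpa using ih
    · rw [if_neg h']
      split
      · exact le_trans ih (by simp)
      · exact ih

theorem pvFilter_len_lt (p p' : Int → Bool) (x : Int)
    (hpx : p x = true) (hp'x : p' x = false) (himp : ∀ s, p' s = true → p s = true) :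
    ∀ l : List Int, x ∈ l → (l.filter p').length < (l.filter p).length := by
  intro l
  induction l with
  | nil => intro h; simp at h
  | cons a t ih =>
    intro hmem
    simp only [List.filter_cons]
    by_cases hax : a = x
    · subst hax
      rw [if_pos hpx, if_neg (by simp [hp'x])]
      exact Nat.lt_succ_of_le (pvFilter_len_le p p' himp t)
    · have hxt : x ∈ t := by
        rcases List.mem_cons.mp hmem with h | h
        · exact absurd h.symm hax
        · exact h
      by_cases h' : p' a = true
      · rw [if_pos h', if_pos (himp a h')]
        simpa using ih hxt
      · rw [if_neg h']
        split
        · exact lt_of_lt_of_le (ih hxt) (by simp)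
        · exact ih hxt

theorem pvWalk_dec (scores : List Int) (best : Int) (bound : Option Int) (nxt : Int)
    (h : pvMinAbove scores best bound = some nxt) :
    (scores.filter (fun s => pvBoundOk (some nxt) s)).length
      < (scores.filter (fun s => pvBoundOk bound s)).length := by
  rcases pvFold_some_mem best bound nxt scores none h with ⟨hm, he⟩ | hbad
  · rcases Bool.and_eq_true_iff.mp he with ⟨_, hb⟩
    exact pvFilter_len_lt (fun s => pvBoundOk bound s) (fun s => pvBoundOk (some nxt) s)
      nxt hb (by simp [pvBoundOk]) (fun s hs => by
        cases bound with
        | none => rfl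
        | some b =>
          simp only [pvBoundOk, decide_eq_true_eq] at hb hs ⊢
          omega) scores hm
  · exact absurd hbad (by simp)

-- B's outer while-loop
def pvWalk (scores : List Int) (best mnr gap : Int) (prev : Int) (bound : Option Int) (rank : Int) : Int :=
  match h : pvMinAbove scores best bound with
  | none => prev
  | some nxt =>
    if nxt - prev > gap then prev
    else if rank + 1 ≥ mnr then nxt
    else pvWalk scores best mnr gap nxt (some nxt) (rank + 1)
termination_by (scores.filter (fun s => pvBoundOk bound s)).length
decreasing_by exact pvWalk_dec scores best bound nxt h

def dynamic_hamming_cutoff_alt (scores : List Int) (best_score : Int) (max_next_ranks : Int) (max_allowed_gap : Int) : Int :=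
  pvWalk scores best_score max_next_ranks max_allowed_gap best_score none 0

-- ===== PRECONDITION & SPEC =====
def Spec_dynamic_hamming_cutoff (scores : List Int) (best_score : Int) (max_next_ranks : Int) (max_allowed_gap : Int) (out : Int) : Prop := out = dynamic_hamming_cutoff_alt scores best_score max_next_ranks max_allowed_gap
instance (scores : List Int) (best_score : Int) (max_next_ranks : Int) (max_allowed_gap : Int) (out : Int) : Decidable (Spec_dynamic_hamming_cutoff scores best_score max_next_ranks max_allowed_gap out) := by unfold Spec_dynamic_hamming_cutoff; infer_instance

-- ===== CLAIM (what is proved, stated in full; the proofs are below) =====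
def Claim_equal_dynamic_hamming_cutoff : Prop := ∀ (scores : List Int) (best_score : Int) (max_next_ranks : Int) (max_allowed_gap : Int), Dom_dynamic_hamming_cutoff scores best_score max_next_ranks max_allowed_gap → Spec_dynamic_hamming_cutoff scores best_score max_next_ranks max_allowed_gap (dynamic_hamming_cutoff scores best_score max_next_ranks max_allowed_gap)

-- ===== LEMMAS AND PROOFS =====

-- Reference loop over the candidate tiers in the order A visits them
-- (threshold always equals previous, so one accumulator suffices).
def pvG (max_next_ranks max_allowed_gap : Int) : List Int → Int → Int → Int
  | [], previous, _rank_count => previous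
  | s :: rest, previous, rank_count =>
    if s - previous > max_allowed_gap then previous
    else if rank_count + 1 ≥ max_next_ranks then s
    else pvG max_next_ranks max_allowed_gap rest s (rank_count + 1)

theorem pvALoop_eq_pvG (bs mnr gap : Int) (L : List (Int × Int)) :
    ∀ prev rc, pvALoop bs mnr gap L prev prev rc
      = pvG mnr gap ((L.map Prod.fst).filter (fun s => decide ¬(s = bs))) prev rc := by
  induction L with
  | nil => intro prev rc; rfl
  | cons p rest ih =>
    obtain ⟨score, count⟩ := p
    intro prev rc
    by_cases hb : score = bs
    · simp [pvALoop, hb, ih prev rc]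
    · simp only [pvALoop, List.map_cons, List.filter_cons, if_neg hb]
      rw [if_pos (by simp [hb] : (decide ¬(score = bs)) = true)]
      simp only [pvG]
      split_ifs with h1 h2
      · rfl
      · rfl
      · exact ih score (rc + 1)

theorem pv_insertBy_congr {α : Type} (p q : α → α → Bool) (x : α) (acc : List α)
    (hpq : ∀ b ∈ acc, p x b = q x b) :
    PySem.List.insertBy p x acc = PySem.List.insertBy q x acc := by
  induction acc with
  | nil => rfl
  | cons y ys ih =>
    simp only [PySem.List.insertBy]
    rw [hpq y (by simp)]
    split_ifs with h
    · rfl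
    · rw [ih (fun b hb => hpq b (by simp [hb]))]

theorem pv_foldl_insertBy_congr {α : Type} (p q : α → α → Bool) :
    ∀ (l acc : List α), (∀ a ∈ l, ∀ b, (b ∈ l ∨ b ∈ acc) → p a b = q a b) →
      l.foldl (fun acc x => PySem.List.insertBy p x acc) acc
        = l.foldl (fun acc x => PySem.List.insertBy q x acc) acc := by
  intro l
  induction l with
  | nil => intro acc _; rfl
  | cons x t ih =>
    intro acc hpq
    simp only [List.foldl_cons]
    rw [pv_insertBy_congr p q x acc (fun b hb => hpq x (by simp) b (Or.inr hb))]
    exact ih _ (fun a ha b hb => hpq a (by simp [ha])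
      b (by rcases hb with hb | hb
            · exact Or.inl (by simp [hb])
            · rcases (PySem.List.mem_insertBy _ _ _ _).mp hb with rfl | hb
              · exact Or.inl (by simp)
              · exact Or.inr hb))

-- A sorts pairs by Python's tuple order; on a list whose first components
-- determine the second ones this is the sort by first component alone.
theorem pv_sorted2_eq_sorted_fst (l : List (Int × Int))
    (hsnd : ∀ a ∈ l, ∀ b ∈ l, a.1 = b.1 → a.2 = b.2) :
    PySem.List.sorted2 l (fun p => p.1) (fun p => p.2)
      = PySem.List.sorted l (fun p => p.1) := by
  simp only [PySem.List.sorted2, PySem.List.sorted, if_neg (by decide : ¬(false = true))]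
  apply pv_foldl_insertBy_congr
  intro a ha b hb
  rcases hb with hb | hb
  · by_cases h1 : a.1 < b.1
    · simp [h1]
    · by_cases h2 : b.1 < a.1
      · simp [h1, h2]
      · have heq : a.1 = b.1 := le_antisymm (not_lt.mp h2) (not_lt.mp h1)
        have := hsnd a ha b hb heq
        simp [h1, h2, this]
  · simp at hb

theorem pv_sorted2_counter (scores : List Int) :
    PySem.List.sorted2 (PySem.Dict.counter scores).items (fun p => p.1) (fun p => p.2)
      = (PySem.List.sorted (PySem.Set.ofList scores) (fun x => x) false).map
          (fun k => (k, (scores.count k : Int))) := by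
  rw [PySem.Dict.items_counter]
  rw [pv_sorted2_eq_sorted_fst]
  · apply PySem.List.sorted_eq_of_perm_of_pairwise_lt
    · exact (PySem.List.sorted_perm _ _ _).map _
    · exact List.Pairwise.map _ (fun a b hab => hab)
        (PySem.List.sorted_ofList_pairwise_lt (xs := scores))
  · intro a ha b hb heq
    simp only [List.mem_map] at ha hb
    obtain ⟨k, _, rfl⟩ := ha
    obtain ⟨k', _, rfl⟩ := hb
    simp only at heq
    subst heq
    rfl

-- B's selection fold returns none when nothing is eligible …
theorem pvFold_none (best : Int) (bound : Option Int) :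
    ∀ l : List Int, (∀ s ∈ l, (decide (s ≠ best) && pvBoundOk bound s) = false) →
      l.foldl (pvSelStep best bound) none = none := by
  intro l
  induction l with
  | nil => intro _; rfl
  | cons s t ih =>
    intro h
    simp only [List.foldl_cons, pvSelStep]
    rw [if_neg (by
      intro hc
      have h1 := (Bool.and_eq_true_iff.mp hc).1
      rw [h s (by simp)] at h1
      exact Bool.false_ne_true h1)]
    exact ih (fun s hs => h s (by simp [hs]))

-- … and returns exactly the least eligible value when one exists.
theorem pvFold_min (best : Int) (bound : Option Int) (m : Int) :
    ∀ (l : List Int) (acc : Option Int),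
      (∀ s ∈ l, (decide (s ≠ best) && pvBoundOk bound s) = true → m ≤ s) →
      ((m ∈ l ∧ (decide (m ≠ best) && pvBoundOk bound m) = true) ∨ acc = some m) →
      (∀ a, acc = some a → m ≤ a) →
      l.foldl (pvSelStep best bound) acc = some m := by
  intro l
  induction l with
  | nil =>
    intro acc _ hm _
    rcases hm with ⟨hmem, _⟩ | hacc
    · simp at hmem
    · simpa using hacc
  | cons s t ih =>
    intro acc hle hm hacc
    simp only [List.foldl_cons]
    apply ih
    · exact fun x hx he => hle x (by simp [hx]) he
    · -- the invariant for the new accumulator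
      unfold pvSelStep
      by_cases hc : (decide (s ≠ best) && pvBoundOk bound s && pvNxtOk acc s) = true
      · rw [if_pos hc]
        rcases Bool.and_eq_true_iff.mp hc with ⟨he, hn⟩
        have hms : m ≤ s := hle s (by simp) he
        rcases hm with ⟨hmem, hem⟩ | hacc'
        · rcases List.mem_cons.mp hmem with rfl | hmt
          · exact Or.inr rfl
          · exact Or.inl ⟨hmt, hem⟩
        · -- acc = some m, but s was accepted so s < m; with m ≤ s contradiction
          rw [hacc'] at hn
          simp only [pvNxtOk, decide_eq_true_eq] at hn
          omega
      · rw [if_neg hc]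
        rcases hm with ⟨hmem, hem⟩ | hacc'
        · rcases List.mem_cons.mp hmem with rfl | hmt
          · -- m = s is eligible but not accepted: acc must already hold some a ≤ s;
            -- minimality of data gives a = m
            cases hval : acc with
            | none =>
              exfalso
              apply hc
              rw [hval]
              simp only [pvNxtOk, Bool.and_true]
              exact hem
            | some a =>
              have ham : m ≤ a := hacc a hval
              have hc' : ¬ (decide (m < a) = true) := by
                intro hlt
                apply hc
                rw [hval]
                simp only [pvNxtOk]
                rw [hem, hlt]
                rfl
              simp only [decide_eq_true_eq] at hc'
              have ham' : a = m := by omega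
              exact Or.inr (by rw [ham'])
          · exact Or.inl ⟨hmt, hem⟩
        · exact Or.inr hacc'
    · -- new acc bound
      intro a ha
      unfold pvSelStep at ha
      by_cases hc : (decide (s ≠ best) && pvBoundOk bound s && pvNxtOk acc s) = true
      · rw [if_pos hc] at ha
        injection ha with has
        rcases Bool.and_eq_true_iff.mp hc with ⟨he, _⟩
        rw [← has]
        exact hle s (by simp) he
      · rw [if_neg hc] at ha
        exact hacc a ha

-- B's walk equals A's walk pvG over any strictly increasing enumeration of
-- exactly the scores that are ≠ best and above the current bound.
theorem pvWalk_eq_pvG (scores : List Int) (best mnr gap : Int) :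
    ∀ (T : List Int) (bound : Option Int) (prev rank : Int),
      T.Pairwise (· < ·) →
      (∀ s, s ∈ T ↔ (s ∈ scores ∧ (decide (s ≠ best) && pvBoundOk bound s) = true)) →
      pvWalk scores best mnr gap prev bound rank = pvG mnr gap T prev rank := by
  intro T
  induction T with
  | nil =>
    intro bound prev rank _ hmem
    have hnone : pvMinAbove scores best bound = none := by
      apply pvFold_none
      intro s hs
      by_contra hne
      have : s ∈ ([] : List Int) := (hmem s).mpr ⟨hs, by
        cases h : (decide (s ≠ best) && pvBoundOk bound s) with
        | false => exact absurd h hne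
        | true => rfl⟩
      simp at this
    rw [pvWalk.eq_def]
    split
    · rfl
    · rename_i nxt heq
      rw [hnone] at heq
      exact absurd heq (by simp)
  | cons m T' ih =>
    intro bound prev rank hpw hmem
    have hpw' := List.pairwise_cons.mp hpw
    have hmE := (hmem m).mp (by simp)
    have hsome : pvMinAbove scores best bound = some m := by
      apply pvFold_min
      · intro s hs he
        have hsT : s ∈ m :: T' := (hmem s).mpr ⟨hs, he⟩
        rcases List.mem_cons.mp hsT with rfl | hsT'
        · exact le_refl s
        · exact le_of_lt (hpw'.1 s hsT')
      · exact Or.inl ⟨hmE.1, hmE.2⟩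
      · intro a ha; exact absurd ha (by simp)
    rw [pvWalk.eq_def]
    split
    · rename_i heq
      rw [hsome] at heq
      exact absurd heq (by simp)
    · rename_i nxt heq
      rw [hsome] at heq
      injection heq with hnm
      rw [← hnm]
      show _ = pvG mnr gap (m :: T') prev rank
      simp only [pvG]
      split_ifs with h1 h2
      · rfl
      · rfl
      · apply ih (some m)
        · exact hpw'.2
        · intro s
          constructor
          · intro hsT'
            have hsT : s ∈ m :: T' := by simp [hsT']
            have he := (hmem s).mp hsT
            have hlt : m < s := hpw'.1 s hsT'
            refine ⟨he.1, ?_⟩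
            rcases Bool.and_eq_true_iff.mp he.2 with ⟨hb, _⟩
            simp only [pvBoundOk]
            rw [hb]
            simp [hlt]
          · rintro ⟨hs, he⟩
            rcases Bool.and_eq_true_iff.mp he with ⟨hb, hgt⟩
            simp only [pvBoundOk, decide_eq_true_eq] at hgt
            have heOld : (decide (s ≠ best) && pvBoundOk bound s) = true := by
              rw [hb]
              simp only [Bool.true_and]
              cases bound with
              | none => rfl
              | some b =>
                rcases Bool.and_eq_true_iff.mp hmE.2 with ⟨_, hbm⟩
                simp only [pvBoundOk, decide_eq_true_eq] at hbm ⊢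
                omega
            have hsT : s ∈ m :: T' := (hmem s).mpr ⟨hs, heOld⟩
            rcases List.mem_cons.mp hsT with rfl | h
            · omega
            · exact h

-- ===== VERDICT (by name: the statement is the Claim_ definition above) =====
theorem dynamic_hamming_cutoff_spec : Claim_equal_dynamic_hamming_cutoff := by
  intro scores bs mnr gap _
  unfold Spec_dynamic_hamming_cutoff dynamic_hamming_cutoff dynamic_hamming_cutoff_alt
  show pvALoop bs mnr gap
      (PySem.List.sorted2 (PySem.Dict.counter scores).items (fun p => p.1) (fun p => p.2))
      bs bs 0
    = pvWalk scores bs mnr gap bs none 0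
  rw [pv_sorted2_counter, pvALoop_eq_pvG]
  rw [List.map_map]
  simp only [Function.comp_def]
  rw [show (fun k : Int => (k, (scores.count k : Int)).1) = (fun k : Int => k) from rfl,
    List.map_id']
  symm
  apply pvWalk_eq_pvG
  · exact (PySem.List.sorted_ofList_pairwise_lt (xs := scores)).filter _
  · intro s
    simp [List.mem_filter, PySem.List.mem_sorted, PySem.Set.mem_ofList, pvBoundOk]
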